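-- pv_equiv track=rewrite | github.com/chronometer/ratkomo_ifrs_deep | src/orchestrator/ifrs_orchestrator.py | _detect_segment_type_and_priority
-- ===== SOURCE A (Python) =====
-- from typing import List, Optional, Tuple
--
-- def _detect_segment_type_and_priority(title: str) -> Tuple[str, int]:
--     """Detect the type of content and its priority based on its title"""
--     title = title.lower()
--
--     # Financial statement sections (highest priority)
--     if any(x in title for x in ['liikevaihto', 'revenue', 'income', 'sales', 'financial', 'statement', 'tase', 'balance', 'sheet', 'profit', 'loss']):
--         return 'financial_statements', 1
--
--     # Notes and disclosures
--     elif any(x in title for x in ['liitetiedot', 'notes', 'disclosure', 'accounting', 'policies']):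
--         return 'notes', 2
--
--     # Segment information
--     elif any(x in title for x in ['segmentti', 'segment', 'liiketoiminta', 'business']):
--         return 'segments', 3
--
--     # Risk and financial instruments
--     elif any(x in title for x in ['riski', 'risk', 'rahoitus', 'financial', 'instruments', 'leases']):
--         return 'risk_and_financial', 4
--
--     # Governance and management
--     elif any(x in title for x in ['hallinto', 'governance', 'johto', 'management', 'board']):
--         return 'governance', 5
--
--     # Other sections
--     elif any(x in title for x in ['vastuullisuus', 'sustainability', 'esg', 'environmental']):
--         return 'sustainability', 6
--     elif any(x in title for x in ['strategia', 'strategy', 'vision', 'mission']):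
--         return 'strategic', 7
--
--     return 'general', 8
-- ===== SOURCE B (Python) =====
-- # Flat keyword -> (segment, priority) map; the duplicated keyword 'financial'
-- # is assigned its lowest priority (1).  One pass keeps the minimum-priority match.
-- _KEYWORD_RULES = {
--     'liikevaihto': ('financial_statements', 1), 'revenue': ('financial_statements', 1),
--     'income': ('financial_statements', 1), 'sales': ('financial_statements', 1),
--     'financial': ('financial_statements', 1), 'statement': ('financial_statements', 1),
--     'tase': ('financial_statements', 1), 'balance': ('financial_statements', 1),
--     'sheet': ('financial_statements', 1), 'profit': ('financial_statements', 1),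
--     'loss': ('financial_statements', 1),
--     'liitetiedot': ('notes', 2), 'notes': ('notes', 2), 'disclosure': ('notes', 2),
--     'accounting': ('notes', 2), 'policies': ('notes', 2),
--     'segmentti': ('segments', 3), 'segment': ('segments', 3),
--     'liiketoiminta': ('segments', 3), 'business': ('segments', 3),
--     'riski': ('risk_and_financial', 4), 'risk': ('risk_and_financial', 4),
--     'rahoitus': ('risk_and_financial', 4), 'instruments': ('risk_and_financial', 4),
--     'leases': ('risk_and_financial', 4),
--     'hallinto': ('governance', 5), 'governance': ('governance', 5),
--     'johto': ('governance', 5), 'management': ('governance', 5), 'board': ('governance', 5),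
--     'vastuullisuus': ('sustainability', 6), 'sustainability': ('sustainability', 6),
--     'esg': ('sustainability', 6), 'environmental': ('sustainability', 6),
--     'strategia': ('strategic', 7), 'strategy': ('strategic', 7),
--     'vision': ('strategic', 7), 'mission': ('strategic', 7),
-- }
--
-- def _detect_segment_type_and_priority(title):
--     t = title.lower()
--     best = ('general', 8)
--     for kw, (seg, pri) in _KEYWORD_RULES.items():
--         if pri < best[1] and kw in t:
--             best = (seg, pri)
--     return best
-- ===== Notes on version B (the rewrite author's own statement) =====
-- stated objective: alternative
-- what changed: Replaced the ordered if/elif group chain (first matching group wins) by a flat keyword-to-(segment,priority) map scanned once with a minimum-priority accumulator; the one keyword shared by two groups collapses to its lowest priority, and correctness follows because A's priorities strictly increase along the chain so the first match equals the minimum-priority match.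
import Mathlib
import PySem

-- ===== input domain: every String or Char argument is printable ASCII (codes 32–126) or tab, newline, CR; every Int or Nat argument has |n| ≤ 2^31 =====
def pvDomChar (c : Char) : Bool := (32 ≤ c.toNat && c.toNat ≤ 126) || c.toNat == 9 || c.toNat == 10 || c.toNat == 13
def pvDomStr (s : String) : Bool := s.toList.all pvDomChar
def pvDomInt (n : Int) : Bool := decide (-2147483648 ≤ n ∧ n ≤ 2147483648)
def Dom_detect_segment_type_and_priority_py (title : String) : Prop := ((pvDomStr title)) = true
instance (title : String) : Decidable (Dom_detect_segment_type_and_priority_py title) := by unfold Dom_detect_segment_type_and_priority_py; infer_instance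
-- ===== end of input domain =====

-- B replaces A's ordered if/elif group chain by a flat keyword map scanned once
-- with a minimum-priority accumulator (alternative decomposition; same cost).

-- ===== PORT A =====
def detect_segment_type_and_priority_py (title : String) : String × Int :=
  let t := PySem.Str.lower title
  if ["liikevaihto", "revenue", "income", "sales", "financial", "statement", "tase", "balance", "sheet", "profit", "loss"].any (fun x => PySem.Str.isIn x t) then
    ("financial_statements", 1)
  else if ["liitetiedot", "notes", "disclosure", "accounting", "policies"].any (fun x => PySem.Str.isIn x t) then
    ("notes", 2)
  else if ["segmentti", "segment", "liiketoiminta", "business"].any (fun x => PySem.Str.isIn x t) then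
    ("segments", 3)
  else if ["riski", "risk", "rahoitus", "financial", "instruments", "leases"].any (fun x => PySem.Str.isIn x t) then
    ("risk_and_financial", 4)
  else if ["hallinto", "governance", "johto", "management", "board"].any (fun x => PySem.Str.isIn x t) then
    ("governance", 5)
  else if ["vastuullisuus", "sustainability", "esg", "environmental"].any (fun x => PySem.Str.isIn x t) then
    ("sustainability", 6)
  else if ["strategia", "strategy", "vision", "mission"].any (fun x => PySem.Str.isIn x t) then
    ("strategic", 7)
  else
    ("general", 8)

-- ===== PORT B =====
-- flat keyword -> (segment, priority) association list (insertion order of Source B's dict)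
def pvKwRules : List (String × String × Int) :=
  [ ("liikevaihto", "financial_statements", 1), ("revenue", "financial_statements", 1),
    ("income", "financial_statements", 1), ("sales", "financial_statements", 1),
    ("financial", "financial_statements", 1), ("statement", "financial_statements", 1),
    ("tase", "financial_statements", 1), ("balance", "financial_statements", 1),
    ("sheet", "financial_statements", 1), ("profit", "financial_statements", 1),
    ("loss", "financial_statements", 1),
    ("liitetiedot", "notes", 2), ("notes", "notes", 2), ("disclosure", "notes", 2),
    ("accounting", "notes", 2), ("policies", "notes", 2),
    ("segmentti", "segments", 3), ("segment", "segments", 3),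
    ("liiketoiminta", "segments", 3), ("business", "segments", 3),
    ("riski", "risk_and_financial", 4), ("risk", "risk_and_financial", 4),
    ("rahoitus", "risk_and_financial", 4), ("instruments", "risk_and_financial", 4),
    ("leases", "risk_and_financial", 4),
    ("hallinto", "governance", 5), ("governance", "governance", 5),
    ("johto", "governance", 5), ("management", "governance", 5), ("board", "governance", 5),
    ("vastuullisuus", "sustainability", 6), ("sustainability", "sustainability", 6),
    ("esg", "sustainability", 6), ("environmental", "sustainability", 6),
    ("strategia", "strategic", 7), ("strategy", "strategic", 7),
    ("vision", "strategic", 7), ("mission", "strategic", 7) ]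

-- one loop step: keep the accumulator unless this keyword beats its priority and occurs in t
def pvStep (t : String) (best : String × Int) (e : String × String × Int) : String × Int :=
  if e.2.2 < best.2 ∧ PySem.Str.isIn e.1 t = true then (e.2.1, e.2.2) else best

def detect_segment_type_and_priority_py_alt (title : String) : String × Int :=
  pvKwRules.foldl (pvStep (PySem.Str.lower title)) ("general", 8)

-- ===== PRECONDITION & SPEC =====
def Spec_detect_segment_type_and_priority_py (title : String) (out : String × Int) : Prop := out = detect_segment_type_and_priority_py_alt title
instance (title : String) (out : String × Int) : Decidable (Spec_detect_segment_type_and_priority_py title out) := by unfold Spec_detect_segment_type_and_priority_py; infer_instance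

-- ===== CLAIM (what is proved, stated in full; the proofs are below) =====
def Claim_equal_detect_segment_type_and_priority_py : Prop := ∀ (title : String), Dom_detect_segment_type_and_priority_py title → Spec_detect_segment_type_and_priority_py title (detect_segment_type_and_priority_py title)

-- ===== LEMMAS AND PROOFS =====

-- folding a uniform group never improves an accumulator that is already at least as good
lemma fold_group_no (t : String) (kws : List String) (seg : String) (pri : Int)
    (best : String × Int) (h : best.2 ≤ pri) :
    List.foldl (pvStep t) best (kws.map (fun k => (k, seg, pri))) = best := by
  induction kws with
  | nil => rfl
  | cons k ks ih =>
      simp only [List.map, List.foldl]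
      have hs : pvStep t best (k, seg, pri) = best := by
        simp only [pvStep]
        rw [if_neg]
        rintro ⟨h1, _⟩
        exact absurd h1 (not_lt.mpr h)
      rw [hs, ih]

-- folding a uniform group that beats the accumulator: any match yields the group's pair
lemma fold_group (t : String) (kws : List String) (seg : String) (pri : Int)
    (best : String × Int) (h : pri < best.2) :
    List.foldl (pvStep t) best (kws.map (fun k => (k, seg, pri))) =
      if kws.any (fun k => PySem.Str.isIn k t) then (seg, pri) else best := by
  induction kws with
  | nil => rfl
  | cons k ks ih =>
      simp only [List.map, List.foldl, List.any_cons]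
      by_cases hk : PySem.Str.isIn k t = true
      · have hs : pvStep t best (k, seg, pri) = (seg, pri) := by
          simp only [pvStep]; rw [if_pos ⟨h, hk⟩]
        have hc : (PySem.Str.isIn k t || ks.any fun k => PySem.Str.isIn k t) = true := by
          rw [hk, Bool.true_or]
        rw [hs, fold_group_no t ks seg pri (seg, pri) (le_refl pri), if_pos hc]
      · have hk' : PySem.Str.isIn k t = false := by
          rwa [Bool.not_eq_true] at hk
        have hs : pvStep t best (k, seg, pri) = best := by
          simp only [pvStep]; rw [if_neg]; intro ⟨_, h2⟩; exact hk h2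
        have hc : (PySem.Str.isIn k t || ks.any fun k => PySem.Str.isIn k t) = (ks.any fun k => PySem.Str.isIn k t) := by
          rw [hk', Bool.false_or]
        have hiff : ((PySem.Str.isIn k t || ks.any fun k => PySem.Str.isIn k t) = true) ↔ ((ks.any fun k => PySem.Str.isIn k t) = true) := by rw [hc]
        rw [hs, ih]
        exact (if_congr hiff rfl rfl).symm

-- the flat rule list is the concatenation of the seven uniform groups
lemma rules_decomp : pvKwRules =
    (["liikevaihto", "revenue", "income", "sales", "financial", "statement", "tase", "balance", "sheet", "profit", "loss"].map (fun k => (k, "financial_statements", (1 : Int)))) ++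
    (["liitetiedot", "notes", "disclosure", "accounting", "policies"].map (fun k => (k, "notes", (2 : Int)))) ++
    (["segmentti", "segment", "liiketoiminta", "business"].map (fun k => (k, "segments", (3 : Int)))) ++
    (["riski", "risk", "rahoitus", "instruments", "leases"].map (fun k => (k, "risk_and_financial", (4 : Int)))) ++
    (["hallinto", "governance", "johto", "management", "board"].map (fun k => (k, "governance", (5 : Int)))) ++
    (["vastuullisuus", "sustainability", "esg", "environmental"].map (fun k => (k, "sustainability", (6 : Int)))) ++
    (["strategia", "strategy", "vision", "mission"].map (fun k => (k, "strategic", (7 : Int)))) := by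
  rfl

-- ===== VERDICT (by name: the statement is the Claim_ definition above) =====
theorem detect_segment_type_and_priority_py_spec : Claim_equal_detect_segment_type_and_priority_py := by
  intro title _
  unfold Spec_detect_segment_type_and_priority_py
  unfold detect_segment_type_and_priority_py detect_segment_type_and_priority_py_alt
  rw [rules_decomp]
  set t := PySem.Str.lower title with ht
  simp only [List.foldl_append]
  by_cases h1 : (["liikevaihto", "revenue", "income", "sales", "financial", "statement", "tase", "balance", "sheet", "profit", "loss"].any (fun x => PySem.Str.isIn x t)) = true
  · rw [if_pos h1, fold_group t _ _ _ ("general", 8) (by norm_num), if_pos h1,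
        fold_group_no t _ _ _ ("financial_statements", 1) (by norm_num),
        fold_group_no t _ _ _ ("financial_statements", 1) (by norm_num),
        fold_group_no t _ _ _ ("financial_statements", 1) (by norm_num),
        fold_group_no t _ _ _ ("financial_statements", 1) (by norm_num),
        fold_group_no t _ _ _ ("financial_statements", 1) (by norm_num),
        fold_group_no t _ _ _ ("financial_statements", 1) (by norm_num)]
  · rw [if_neg h1, fold_group t _ _ _ ("general", 8) (by norm_num), if_neg h1]
    have hfin : PySem.Str.isIn "financial" t = false := by
      rw [Bool.not_eq_true, List.any_eq_false] at h1
      have hf := h1 "financial" (by simp)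
      rwa [Bool.not_eq_true] at hf
    have h4eq : (["riski", "risk", "rahoitus", "financial", "instruments", "leases"].any (fun x => PySem.Str.isIn x t)) = (["riski", "risk", "rahoitus", "instruments", "leases"].any (fun x => PySem.Str.isIn x t)) := by
      simp only [List.any_cons, hfin, Bool.false_or]
    by_cases h2 : (["liitetiedot", "notes", "disclosure", "accounting", "policies"].any (fun x => PySem.Str.isIn x t)) = true
    · rw [if_pos h2, fold_group t _ _ _ ("general", 8) (by norm_num), if_pos h2,
          fold_group_no t _ _ _ ("notes", 2) (by norm_num),
          fold_group_no t _ _ _ ("notes", 2) (by norm_num),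
          fold_group_no t _ _ _ ("notes", 2) (by norm_num),
          fold_group_no t _ _ _ ("notes", 2) (by norm_num),
          fold_group_no t _ _ _ ("notes", 2) (by norm_num)]
    · rw [if_neg h2, fold_group t _ _ _ ("general", 8) (by norm_num), if_neg h2]
      by_cases h3 : (["segmentti", "segment", "liiketoiminta", "business"].any (fun x => PySem.Str.isIn x t)) = true
      · rw [if_pos h3, fold_group t _ _ _ ("general", 8) (by norm_num), if_pos h3,
            fold_group_no t _ _ _ ("segments", 3) (by norm_num),
            fold_group_no t _ _ _ ("segments", 3) (by norm_num),
            fold_group_no t _ _ _ ("segments", 3) (by norm_num),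
            fold_group_no t _ _ _ ("segments", 3) (by norm_num)]
      · rw [if_neg h3, fold_group t _ _ _ ("general", 8) (by norm_num), if_neg h3]
        by_cases h4 : (["riski", "risk", "rahoitus", "instruments", "leases"].any (fun x => PySem.Str.isIn x t)) = true
        · rw [if_pos (by rw [h4eq]; exact h4), fold_group t _ _ _ ("general", 8) (by norm_num), if_pos h4,
              fold_group_no t _ _ _ ("risk_and_financial", 4) (by norm_num),
              fold_group_no t _ _ _ ("risk_and_financial", 4) (by norm_num),
              fold_group_no t _ _ _ ("risk_and_financial", 4) (by norm_num)]
        · rw [if_neg (by rw [h4eq]; exact h4), fold_group t _ _ _ ("general", 8) (by norm_num), if_neg h4]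
          by_cases h5 : (["hallinto", "governance", "johto", "management", "board"].any (fun x => PySem.Str.isIn x t)) = true
          · rw [if_pos h5, fold_group t _ _ _ ("general", 8) (by norm_num), if_pos h5,
                fold_group_no t _ _ _ ("governance", 5) (by norm_num),
                fold_group_no t _ _ _ ("governance", 5) (by norm_num)]
          · rw [if_neg h5, fold_group t _ _ _ ("general", 8) (by norm_num), if_neg h5]
            by_cases h6 : (["vastuullisuus", "sustainability", "esg", "environmental"].any (fun x => PySem.Str.isIn x t)) = true
            · rw [if_pos h6, fold_group t _ _ _ ("general", 8) (by norm_num), if_pos h6,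
                  fold_group_no t _ _ _ ("sustainability", 6) (by norm_num)]
            · rw [if_neg h6, fold_group t _ _ _ ("general", 8) (by norm_num), if_neg h6]
              by_cases h7 : (["strategia", "strategy", "vision", "mission"].any (fun x => PySem.Str.isIn x t)) = true
              · rw [if_pos h7, fold_group t _ _ _ ("general", 8) (by norm_num), if_pos h7]
              · rw [if_neg h7, fold_group t _ _ _ ("general", 8) (by norm_num), if_neg h7]
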